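-- pv_equiv track=rewrite | github.com/maxduganknight/climatedatascience | scrapers/heatwave_mapper.py | _clean_county_name
-- ===== SOURCE A (Python) =====
-- def _clean_county_name(county_name: str) -> str:
--     """Clean and standardize county name for matching."""
--     # Remove common directional prefixes
--     prefixes_to_remove = [
--         'Northern', 'Southern', 'Eastern', 'Western', 'Central',
--         'North', 'South', 'East', 'West', 'Northwest', 'Northeast',
--         'Southwest', 'Southeast', 'Upper', 'Lower', 'Inland'
--     ]
--
--     name = county_name.strip()
--     for prefix in prefixes_to_remove:
--         if name.startswith(prefix + ' '):
--             name = name[len(prefix):].strip()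
--             break
--
--     return name
-- ===== SOURCE B (Python) =====
-- _PREFIXES = {
--     'Northern', 'Southern', 'Eastern', 'Western', 'Central',
--     'North', 'South', 'East', 'West', 'Northwest', 'Northeast',
--     'Southwest', 'Southeast', 'Upper', 'Lower', 'Inland'
-- }
--
-- def _clean_county_name(county_name: str) -> str:
--     """Clean and standardize county name for matching."""
--     name = county_name.strip()
--     parts = name.split(' ', 1)
--     if len(parts) == 2 and parts[0] in _PREFIXES:
--         return parts[1].strip()
--     return name
-- ===== Notes on version B (the rewrite author's own statement) =====
-- stated objective: simpler
-- what changed: Replaces the 16-iteration per-prefix startswith scan with a single split of the stripped name on one literal space (maxsplit 1) followed by a set-membership test on the first word.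
import Mathlib
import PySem

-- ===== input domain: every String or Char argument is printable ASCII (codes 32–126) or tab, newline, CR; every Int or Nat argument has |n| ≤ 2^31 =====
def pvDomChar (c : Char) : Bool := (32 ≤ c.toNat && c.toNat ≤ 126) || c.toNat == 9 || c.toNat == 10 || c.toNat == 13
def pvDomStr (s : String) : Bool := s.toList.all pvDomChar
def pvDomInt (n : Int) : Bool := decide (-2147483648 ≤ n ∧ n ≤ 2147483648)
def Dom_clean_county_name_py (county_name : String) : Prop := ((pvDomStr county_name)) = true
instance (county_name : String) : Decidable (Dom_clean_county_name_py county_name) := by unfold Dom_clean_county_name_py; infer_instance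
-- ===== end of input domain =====

-- B replaces A's per-prefix startswith loop by one split on a literal space plus a set lookup of the first word (simpler).

-- ===== PORT A =====
def pvPrefixes : List String :=
  ["Northern", "Southern", "Eastern", "Western", "Central",
   "North", "South", "East", "West", "Northwest", "Northeast",
   "Southwest", "Southeast", "Upper", "Lower", "Inland"]

-- "for prefix in …: if name.startswith(prefix + ' '): name = name[len(prefix):].strip(); break"
def pvCleanLoop (name : List Char) : List String → List Char
  | [] => name
  | p :: ps =>
    if PySem.Chars.startswith name (p.toList ++ [' ']) then
      PySem.Chars.strip (PySem.List.slice name (some (p.toList.length : Int)) none)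
    else pvCleanLoop name ps

def clean_county_name_py (county_name : String) : String :=
  String.ofList (pvCleanLoop (PySem.Chars.strip county_name.toList) pvPrefixes)

-- ===== PORT B =====
def pvPrefixSet : PySem.Set (List Char) := PySem.Set.ofList (pvPrefixes.map String.toList)

def clean_county_name_py_alt (county_name : String) : String :=
  let name := PySem.Chars.strip county_name.toList
  match PySem.Chars.splitOnMax name [' '] 1 with          -- parts = name.split(' ', 1)
  | [w, rest] =>                                           -- len(parts) == 2
    if pvPrefixSet.contains w then String.ofList (PySem.Chars.strip rest)
    else String.ofList name
  | _ => String.ofList name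

-- ===== PRECONDITION & SPEC =====
def Spec_clean_county_name_py (county_name : String) (out : String) : Prop := out = clean_county_name_py_alt county_name
instance (county_name : String) (out : String) : Decidable (Spec_clean_county_name_py county_name out) := by unfold Spec_clean_county_name_py; infer_instance

-- ===== CLAIM (what is proved, stated in full; the proofs are below) =====
def Claim_equal_clean_county_name_py : Prop := ∀ (county_name : String), Dom_clean_county_name_py county_name → Spec_clean_county_name_py county_name (clean_county_name_py county_name)

-- ===== LEMMAS AND PROOFS =====

-- splitOnMax.go with budget 0: the rest of the input is one final piece
lemma pv_go_zero (fuel : Nat) (l cur : List Char) (accs : List (List Char))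
    (h : l.length < fuel) :
    PySem.Chars.splitOnMax.go [' '] fuel 0 l cur accs = accs.reverse ++ [cur.reverse ++ l] := by
  match fuel, l with
  | 0, l => omega
  | fuel+1, [] => simp [PySem.Chars.splitOnMax.go]
  | fuel+1, c :: rest => simp [PySem.Chars.splitOnMax.go]

-- splitOnMax.go with budget 1 splits at the first space, if any
lemma pv_go_one (l : List Char) : ∀ (fuel : Nat) (cur : List Char) (accs : List (List Char)),
    l.length < fuel →
    PySem.Chars.splitOnMax.go [' '] fuel 1 l cur accs =
      if ' ' ∈ l then
        accs.reverse ++ [cur.reverse ++ l.takeWhile (· ≠ ' '), (l.dropWhile (· ≠ ' ')).tail]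
      else accs.reverse ++ [cur.reverse ++ l] := by
  induction l with
  | nil =>
    intro fuel cur accs h
    match fuel with
    | fuel+1 => simp [PySem.Chars.splitOnMax.go]
  | cons c rest ih =>
    intro fuel cur accs h
    match fuel with
    | fuel+1 =>
      by_cases hc : c = ' '
      · subst hc
        simp only [PySem.Chars.splitOnMax.go]
        rw [if_neg (by omega), if_pos (by simp)]
        rw [show List.drop [' '].length (' ' :: rest) = rest from rfl]
        rw [pv_go_zero fuel rest [] _ (by simpa using h)]
        simp [List.takeWhile, List.dropWhile]
      · have hpre : [' '].isPrefixOf (c :: rest) = false := by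
          simp [List.isPrefixOf]; exact fun he => absurd he.symm hc
        simp only [PySem.Chars.splitOnMax.go]
        rw [if_neg (by omega), hpre]
        simp only [Bool.false_eq_true, if_false]
        rw [ih fuel (c :: cur) accs (by simpa using h)]
        by_cases hs : ' ' ∈ rest
        · simp [hs, hc, Ne.symm hc]
        · simp [hs, Ne.symm hc]

-- name.split(' ', 1) characterised by the first space
lemma pv_split1 (n : List Char) :
    PySem.Chars.splitOnMax n [' '] 1 =
      if ' ' ∈ n then [n.takeWhile (· ≠ ' '), (n.dropWhile (· ≠ ' ')).tail] else [n] := by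
  unfold PySem.Chars.splitOnMax
  rw [if_neg (by omega), show (1 : Int).toNat = 1 from rfl]
  rw [pv_go_one n (n.length + 1) [] [] (by omega)]
  split <;> simp

-- a space-free word followed by ' ' yields exactly the takeWhile/dropWhile decomposition
lemma pv_word_parts (p t : List Char) (hp : ' ' ∉ p) :
    (p ++ ' ' :: t).takeWhile (· ≠ ' ') = p ∧ (p ++ ' ' :: t).dropWhile (· ≠ ' ') = ' ' :: t := by
  induction p with
  | nil => simp
  | cons c cs ih =>
    simp only [List.mem_cons, not_or] at hp
    have ih' := ih hp.2
    simp only [ne_eq, decide_not] at ih' ⊢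
    simp only [List.cons_append, List.takeWhile_cons, List.dropWhile_cons]
    simp [Ne.symm hp.1, ih'.1, ih'.2]

-- conversely, if the first word of n is p then "p ++ ' '" is a prefix of n
lemma pv_word_prefix (n p : List Char) (hs : ' ' ∈ n) (hw : n.takeWhile (· ≠ ' ') = p) :
    (p ++ [' ']).isPrefixOf n = true := by
  have hne : n.dropWhile (· ≠ ' ') ≠ [] := by
    rw [Ne, List.dropWhile_eq_nil_iff]
    push Not
    exact ⟨' ', hs, by simp⟩
  obtain ⟨c, t, hct⟩ := List.exists_cons_of_ne_nil hne
  have hc : c = ' ' := by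
    have := List.head?_dropWhile_not (fun x => decide (x ≠ ' ')) n
    rw [show List.dropWhile (fun x => decide (x ≠ ' ')) n = c :: t from hct] at this
    simpa using this
  have hn : n = p ++ ' ' :: t := by
    conv_lhs => rw [← List.takeWhile_append_dropWhile (p := fun x => decide (x ≠ ' ')) (l := n)]
    rw [hw, hct, hc]
  rw [hn, List.isPrefixOf_iff_prefix]
  exact ⟨t, by simp⟩

lemma pv_strip_cons_space (t : List Char) :
    PySem.Chars.strip (' ' :: t) = PySem.Chars.strip t := by
  simp [PySem.Chars.strip, PySem.Chars.lstrip, PySem.Chars.isspace]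

-- A's loop: returns strip-of-after-first-space iff the first word is one of the prefixes
lemma pv_loop_spec (ps : List String) (hps : ∀ p ∈ ps, ' ' ∉ p.toList) (n : List Char) :
    pvCleanLoop n ps =
      if (' ' ∈ n) ∧ (n.takeWhile (· ≠ ' ')) ∈ ps.map String.toList then
        PySem.Chars.strip ((n.dropWhile (· ≠ ' ')).tail)
      else n := by
  induction ps with
  | nil => simp [pvCleanLoop]
  | cons p ps ih =>
    by_cases hm : PySem.Chars.startswith n (p.toList ++ [' ']) = true
    · have hpre : (p.toList ++ [' ']) <+: n := by
        have := hm
        unfold PySem.Chars.startswith at this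
        exact List.isPrefixOf_iff_prefix.mp this
      obtain ⟨t, ht⟩ := hpre
      have hn : n = p.toList ++ ' ' :: t := by rw [← ht]; simp
      have hparts := pv_word_parts p.toList t (hps p (by simp))
      simp only [pvCleanLoop, if_pos hm]
      have hslice : PySem.List.slice n (some (p.toList.length : Int)) none = ' ' :: t := by
        rw [hn, PySem.List.slice_from_natCast]
        simp
      rw [hslice, pv_strip_cons_space]
      rw [if_pos ⟨by rw [hn]; simp, by rw [hn, hparts.1]; simp⟩]
      rw [hn, hparts.2]
      rfl
    · simp only [pvCleanLoop, if_neg hm]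
      rw [ih (fun q hq => hps q (List.mem_cons_of_mem _ hq))]
      by_cases hs : ' ' ∈ n
      · have hnp : n.takeWhile (· ≠ ' ') ≠ p.toList := by
          intro he
          exact hm (by unfold PySem.Chars.startswith; exact pv_word_prefix n p.toList hs he)
        by_cases hw : (n.takeWhile (· ≠ ' ')) ∈ ps.map String.toList
        · rw [if_pos ⟨hs, hw⟩, if_pos ⟨hs, by rw [List.map_cons]; exact List.mem_cons_of_mem _ hw⟩]
        · rw [if_neg (fun h => hw h.2), if_neg]
          intro h
          rcases List.mem_cons.mp (by rw [List.map_cons] at h; exact h.2) with h1 | h2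
          · exact hnp h1
          · exact hw h2
      · rw [if_neg (fun h => hs h.1), if_neg (fun h => hs h.1)]

-- the literal prefix set: deduplication is the identity here, and no prefix contains a space
lemma pv_set_eq : pvPrefixSet = pvPrefixes.map String.toList := by decide

lemma pv_no_space : ∀ p ∈ pvPrefixes, ' ' ∉ p.toList := by decide

-- ===== VERDICT (by name: the statement is the Claim_ definition above) =====
theorem clean_county_name_py_spec : Claim_equal_clean_county_name_py := by
  unfold Claim_equal_clean_county_name_py
  intro s _
  unfold Spec_clean_county_name_py clean_county_name_py clean_county_name_py_alt
  simp only []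
  rw [pv_split1 (PySem.Chars.strip s.toList), pv_loop_spec pvPrefixes pv_no_space, pv_set_eq]
  by_cases hs : ' ' ∈ PySem.Chars.strip s.toList
  · rw [if_pos hs]
    show _ = if PySem.Set.contains (List.map String.toList pvPrefixes)
                ((PySem.Chars.strip s.toList).takeWhile (· ≠ ' ')) = true then
          String.ofList (PySem.Chars.strip ((PySem.Chars.strip s.toList).dropWhile (· ≠ ' ')).tail)
        else String.ofList (PySem.Chars.strip s.toList)
    by_cases hw : ((PySem.Chars.strip s.toList).takeWhile (· ≠ ' ')) ∈ pvPrefixes.map String.toList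
    · rw [if_pos ⟨hs, hw⟩, if_pos (by simpa [PySem.Set.contains] using hw)]
    · rw [if_neg (fun h => hw h.2), if_neg (by simpa [PySem.Set.contains] using hw)]
  · rw [if_neg (fun h => hs h.1), if_neg hs]
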